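-- pv_equiv track=rewrite | github.com/Amrtamer711/AI-Cybersecurity-Project | utils.py | multiples_of_two
-- ===== SOURCE A (Python) =====
-- def multiples_of_two(start, end):
--     multiples = []
--     power = 1
--     while power <= end:
--         if power >= start:
--             multiples.append(power)
--         power *= 2
--     return multiples
-- ===== SOURCE B (Python) =====
-- def multiples_of_two(start, end):
--     if end < 1:
--         return []
--     hi = end.bit_length() - 1            # largest i with 2**i <= end
--     lo = 0 if start <= 1 else (start - 1).bit_length()   # smallest i with 2**i >= start
--     return [1 << i for i in range(lo, hi + 1)]
-- ===== Notes on version B (the rewrite author's own statement) =====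
-- stated objective: alternative
-- what changed: Replaces the doubling-and-test while loop with closed-form exponent bounds computed from bit_length and a direct list of the powers over that index range.
import Mathlib
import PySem

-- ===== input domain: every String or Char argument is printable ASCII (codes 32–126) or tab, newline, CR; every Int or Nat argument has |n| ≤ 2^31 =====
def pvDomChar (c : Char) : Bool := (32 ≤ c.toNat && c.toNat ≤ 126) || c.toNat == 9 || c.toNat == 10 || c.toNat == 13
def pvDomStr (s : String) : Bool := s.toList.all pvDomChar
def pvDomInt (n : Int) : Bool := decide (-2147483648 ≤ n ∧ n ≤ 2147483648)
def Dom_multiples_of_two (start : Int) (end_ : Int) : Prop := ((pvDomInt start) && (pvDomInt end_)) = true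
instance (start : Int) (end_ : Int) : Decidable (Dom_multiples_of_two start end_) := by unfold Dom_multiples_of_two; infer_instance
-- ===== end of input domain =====

-- B replaces A's doubling-and-test while loop by closed-form exponent bounds from bit_length
-- and a direct list of the powers over that index range.

-- ===== PORT A =====
-- A's while loop, one fuel unit per iteration; fuel 33 is enough on Dom (the loop stops at the
-- first power > end_, and 2^32 > end_ for every |end_| ≤ 2^31).
def multiplesLoopA (start : Int) (end_ : Int) (power : Int) : Nat → List Int
  | 0 => []
  | fuel + 1 =>
    if power ≤ end_ then
      (if start ≤ power then [power] else []) ++ multiplesLoopA start end_ (power * 2) fuel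
    else []

def multiples_of_two (start : Int) (end_ : Int) : List Int :=
  multiplesLoopA start end_ 1 33

-- ===== PORT B =====
-- Source B: int.bit_length → PySem.Int.bitLength; range(lo, hi+1) → List.range' lo (hi+1-lo); 1 << i = 2^i.
def multiples_of_two_alt (start : Int) (end_ : Int) : List Int :=
  if end_ < 1 then []
  else
    let hi : Nat := PySem.Int.bitLength end_ - 1
    let lo : Nat := if start ≤ 1 then 0 else PySem.Int.bitLength (start - 1)
    (List.range' lo (hi + 1 - lo)).map (fun i => (2 : Int) ^ i)

-- ===== PRECONDITION & SPEC =====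
def Spec_multiples_of_two (start : Int) (end_ : Int) (out : List Int) : Prop := out = multiples_of_two_alt start end_
instance (start : Int) (end_ : Int) (out : List Int) : Decidable (Spec_multiples_of_two start end_ out) := by unfold Spec_multiples_of_two; infer_instance

-- ===== CLAIM (what is proved, stated in full; the proofs are below) =====
def Claim_equal_multiples_of_two : Prop := ∀ (start : Int) (end_ : Int), Dom_multiples_of_two start end_ → Spec_multiples_of_two start end_ (multiples_of_two start end_)

-- ===== LEMMAS AND PROOFS =====

-- the per-exponent step function A's loop realises
def mtF (start end_ : Int) (i : Nat) : Option Int :=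
  if (2 : Int) ^ i ≤ end_ ∧ start ≤ (2 : Int) ^ i then some ((2 : Int) ^ i) else none

lemma multiplesLoopA_eq_filterMap (start end_ : Int) :
    ∀ (fuel k : Nat),
      multiplesLoopA start end_ ((2 : Int) ^ k) fuel =
        (List.range' k fuel).filterMap (mtF start end_) := by
  intro fuel
  induction fuel with
  | zero => intro k; simp [multiplesLoopA]
  | succ f ih =>
    intro k
    by_cases hle : (2 : Int) ^ k ≤ end_
    · rw [List.range'_succ]
      have h2 : (2 : Int) ^ k * 2 = (2 : Int) ^ (k + 1) := by ring
      by_cases hst : start ≤ (2 : Int) ^ k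
      · simp [multiplesLoopA, hle, hst, h2, ih (k + 1), mtF]
      · simp [multiplesLoopA, hle, hst, h2, ih (k + 1), mtF]
    · simp only [multiplesLoopA, if_neg hle]
      symm
      rw [List.filterMap_eq_nil_iff]
      intro i hi
      have hki : k ≤ i := (List.mem_range'_1.mp hi).1
      have hmono : (2 : Int) ^ k ≤ (2 : Int) ^ i := pow_le_pow_right₀ (by norm_num) hki
      simp only [mtF, ite_eq_right_iff]
      intro ⟨h1, _⟩
      exact absurd (le_trans hmono h1) hle

lemma filterMap_mtF_eq_nil (start end_ : Int) (a n : Nat)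
    (h : ∀ i, a ≤ i → i < a + n → mtF start end_ i = none) :
    (List.range' a n).filterMap (mtF start end_) = [] := by
  rw [List.filterMap_eq_nil_iff]
  intro i hi
  have hm := List.mem_range'_1.mp hi
  exact h i hm.1 hm.2

lemma filterMap_mtF_eq_map (start end_ : Int) (a n : Nat)
    (h : ∀ i, a ≤ i → i < a + n → mtF start end_ i = some ((2 : Int) ^ i)) :
    (List.range' a n).filterMap (mtF start end_) = (List.range' a n).map (fun i => (2 : Int) ^ i) := by
  induction n generalizing a with
  | zero => simp
  | succ m ih =>
    rw [List.range'_succ, List.filterMap_cons, h a le_rfl (by omega), List.map_cons,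
      ih (a + 1) (fun i h1 h2 => h i (by omega) (by omega))]

lemma int_pow_le_iff_natAbs (x : Int) (i : Nat) (hx : 1 ≤ x) :
    ((2 : Int) ^ i ≤ x ↔ 2 ^ i ≤ x.natAbs) := by
  have h1 : (((2 : Nat) ^ i : Nat) : Int) = (2 : Int) ^ i := by push_cast; ring
  have h2 : ((x.natAbs : Nat) : Int) = x := Int.natAbs_of_nonneg (by omega)
  constructor
  · intro h
    have hc : ((2 ^ i : Nat) : Int) ≤ ((x.natAbs : Nat) : Int) := by rw [h1, h2]; exact h
    exact_mod_cast hc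
  · intro h
    have hc : ((2 ^ i : Nat) : Int) ≤ ((x.natAbs : Nat) : Int) := by exact_mod_cast h
    rwa [h1, h2] at hc

-- ===== VERDICT (by name: the statement is the Claim_ definition above) =====
theorem multiples_of_two_spec : Claim_equal_multiples_of_two := by
  intro start end_ hdom
  have hbnd : start ≤ 2147483648 ∧ end_ ≤ 2147483648 := by
    simp only [Dom_multiples_of_two, pvDomInt, Bool.and_eq_true, decide_eq_true_eq] at hdom
    omega
  show multiples_of_two start end_ = multiples_of_two_alt start end_
  have hA : multiples_of_two start end_ = (List.range' 0 33).filterMap (mtF start end_) := by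
    have h := multiplesLoopA_eq_filterMap start end_ 33 0
    simpa [multiples_of_two] using h
  by_cases hend : end_ < 1
  · rw [hA, filterMap_mtF_eq_nil start end_ 0 33 (by
      intro i hi0 hilo
      have hone : (1 : Int) ≤ (2 : Int) ^ i := one_le_pow₀ (by norm_num)
      simp only [mtF, ite_eq_right_iff]
      intro ⟨h1, _⟩
      omega)]
    simp [multiples_of_two_alt, hend]
  · push_neg at hend
    set bl := PySem.Int.bitLength end_ with hbl
    set hi : Nat := bl - 1 with hhi
    have hlow : 2 ^ hi ≤ end_.natAbs := PySem.Int.two_pow_bitLength_le end_ (by omega)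
    have hhigh : end_.natAbs < 2 ^ bl := PySem.Int.lt_two_pow_bitLength end_
    have habs1 : 1 ≤ end_.natAbs := by omega
    have hbl1 : 1 ≤ bl := by
      by_contra h
      have hz : bl = 0 := by omega
      rw [hz] at hhigh; simp at hhigh; omega
    have hnatbnd : end_.natAbs ≤ 2 ^ 31 := by
      have h31 : end_ ≤ 2147483648 := hbnd.2
      omega
    have hhi31 : hi ≤ 31 := by
      by_contra h
      push_neg at h
      have h1 : (2 : Nat) ^ 32 ≤ 2 ^ hi := Nat.pow_le_pow_right (by norm_num) (by omega)
      have h2 : (2 : Nat) ^ 32 ≤ end_.natAbs := le_trans h1 hlow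
      have h3 : (2 : Nat) ^ 31 < 2 ^ 32 := by norm_num
      omega
    set lo : Nat := if start ≤ 1 then 0 else PySem.Int.bitLength (start - 1) with hlo
    have hcond : ∀ i : Nat, mtF start end_ i =
        (if lo ≤ i ∧ i ≤ hi then some ((2 : Int) ^ i) else none) := by
      intro i
      have c1 : ((2 : Int) ^ i ≤ end_ ↔ i ≤ hi) := by
        rw [int_pow_le_iff_natAbs end_ i hend]
        constructor
        · intro h
          by_contra hc
          push_neg at hc
          have hmono : (2 : Nat) ^ bl ≤ 2 ^ i := Nat.pow_le_pow_right (by norm_num) (by omega)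
          omega
        · intro h
          have hmono : (2 : Nat) ^ i ≤ 2 ^ hi := Nat.pow_le_pow_right (by norm_num) h
          omega
      have c2 : (start ≤ (2 : Int) ^ i ↔ lo ≤ i) := by
        by_cases hst : start ≤ 1
        · have hone : (1 : Int) ≤ (2 : Int) ^ i := one_le_pow₀ (by norm_num)
          simp only [hlo, if_pos hst]
          exact ⟨fun _ => Nat.zero_le i, fun _ => le_trans hst hone⟩
        · push_neg at hst
          simp only [hlo, if_neg (by omega : ¬ start ≤ 1)]
          set bs := PySem.Int.bitLength (start - 1) with hbs
          have hslow : 2 ^ (bs - 1) ≤ (start - 1).natAbs :=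
            PySem.Int.two_pow_bitLength_le (start - 1) (by omega)
          have hshigh : (start - 1).natAbs < 2 ^ bs := PySem.Int.lt_two_pow_bitLength (start - 1)
          have hsabs1 : 1 ≤ (start - 1).natAbs := by omega
          have hbs1 : 1 ≤ bs := by
            by_contra h
            have hz : bs = 0 := by omega
            rw [hz] at hshigh; simp at hshigh; omega
          have key : ((2 : Int) ^ i ≤ start - 1 ↔ 2 ^ i ≤ (start - 1).natAbs) :=
            int_pow_le_iff_natAbs (start - 1) i (by omega)
          constructor
          · intro h
            by_contra hc
            push_neg at hc
            have h1 : (2 : Nat) ^ i ≤ 2 ^ (bs - 1) := Nat.pow_le_pow_right (by norm_num) (by omega)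
            have h2 : (2 : Nat) ^ i ≤ (start - 1).natAbs := le_trans h1 hslow
            have h3 := key.mpr h2
            omega
          · intro h
            have h1 : (2 : Nat) ^ bs ≤ 2 ^ i := Nat.pow_le_pow_right (by norm_num) h
            have h2 : ¬ ((2 : Nat) ^ i ≤ (start - 1).natAbs) := by omega
            have h3 := fun hx => h2 (key.mp hx)
            omega
      by_cases h1 : lo ≤ i <;> by_cases h2 : i ≤ hi
      · simp only [mtF]; rw [if_pos ⟨c1.mpr h2, c2.mpr h1⟩, if_pos ⟨h1, h2⟩]
      · simp only [mtF]; rw [if_neg (fun hc => h2 (c1.mp hc.1)), if_neg (fun hc => h2 hc.2)]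
      · simp only [mtF]; rw [if_neg (fun hc => h1 (c2.mp hc.2)), if_neg (fun hc => h1 hc.1)]
      · simp only [mtF]; rw [if_neg (fun hc => h2 (c1.mp hc.1)), if_neg (fun hc => h2 hc.2)]
    have hB : multiples_of_two_alt start end_ =
        (List.range' lo (hi + 1 - lo)).map (fun i => (2 : Int) ^ i) := by
      simp only [multiples_of_two_alt, if_neg (by omega : ¬ end_ < 1)]
      rfl
    rw [hA, hB]
    by_cases hcase : lo ≤ hi + 1
    · have hsum : lo + (hi + 1 - lo) = hi + 1 := by omega
      have hsum2 : hi + 1 + (32 - hi) = 33 := by omega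
      have e1 : List.range' 0 lo ++ List.range' lo (hi + 1 - lo) = List.range' 0 (hi + 1) := by
        have h : List.range' 0 lo ++ List.range' (0 + 1 * lo) (hi + 1 - lo) =
            List.range' 0 (lo + (hi + 1 - lo)) := List.range'_append
        simpa [hsum] using h
      have e2 : List.range' 0 (hi + 1) ++ List.range' (hi + 1) (33 - (hi + 1)) = List.range' 0 33 := by
        have h : List.range' 0 (hi + 1) ++ List.range' (0 + 1 * (hi + 1)) (33 - (hi + 1)) =
            List.range' 0 ((hi + 1) + (33 - (hi + 1))) := List.range'_append
        simpa [hsum2] using h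
      rw [← e2, ← e1, List.filterMap_append, List.filterMap_append]
      rw [filterMap_mtF_eq_nil start end_ 0 lo (by
        intro i hi0 hilo
        rw [hcond i, if_neg]; omega)]
      rw [filterMap_mtF_eq_nil start end_ (hi + 1) (33 - (hi + 1)) (by
        intro i hi0 hilo
        rw [hcond i, if_neg]; omega)]
      rw [filterMap_mtF_eq_map start end_ lo (hi + 1 - lo) (by
        intro i hi0 hilo
        rw [hcond i, if_pos]; omega)]
      simp
    · push_neg at hcase
      have hmid : hi + 1 - lo = 0 := by omega
      rw [hmid]
      rw [filterMap_mtF_eq_nil start end_ 0 33 (by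
        intro i hi0 hilo
        rw [hcond i, if_neg]; omega)]
      simp
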